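-- pv_equiv track=rewrite | github.com/kjei/SimulatorWrap | src/subsurface/multphaseflow/jutul_darcy.py | data_is_prod
-- ===== SOURCE A (Python) =====
-- def data_is_prod(datakey):
--     map = [
--         'FOPR', 'FGPR', 'FWPR', 'FLPR',
--         'WOPR', 'WGPR', 'WWPR', 'WLPR',
--     ]
--     is_prod = False
--     for m in map:
--         if m in datakey.upper():
--             is_prod = True
--             break
--     return is_prod
-- ===== SOURCE B (Python) =====
-- def data_is_prod(datakey):
--     s = datakey.upper()
--     return any(s[i] in 'FW' and s[i + 1] in 'OGWL' and s[i + 2:i + 4] == 'PR'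
--                for i in range(len(s) - 3))
-- ===== Notes on version B (the rewrite author's own statement) =====
-- stated objective: alternative
-- what changed: Replaces eight separate substring searches over the uppercased key by a single sliding-window scan that checks the character classes [FW][OGWL]PR at each position in one pass.
import Mathlib
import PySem

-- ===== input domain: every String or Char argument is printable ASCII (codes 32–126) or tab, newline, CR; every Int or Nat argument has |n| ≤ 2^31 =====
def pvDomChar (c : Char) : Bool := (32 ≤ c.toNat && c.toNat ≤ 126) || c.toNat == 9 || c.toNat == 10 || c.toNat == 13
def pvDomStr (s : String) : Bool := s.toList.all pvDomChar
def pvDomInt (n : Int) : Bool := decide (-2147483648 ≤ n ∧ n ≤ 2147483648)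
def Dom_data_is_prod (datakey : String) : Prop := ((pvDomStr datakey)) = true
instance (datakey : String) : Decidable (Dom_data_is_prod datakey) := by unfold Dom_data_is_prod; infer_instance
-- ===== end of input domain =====

-- B replaces A's eight substring searches with one sliding-window character-class scan (alternative decomposition, same cost class).


-- ===== PORT A =====
-- the literal table from A
def prodMap : List String :=
  ["FOPR", "FGPR", "FWPR", "FLPR", "WOPR", "WGPR", "WWPR", "WLPR"]

-- A's for-loop with is_prod/break: first match wins, else False
def prodLoop (u : String) : List String → Bool
  | [] => false
  | m :: rest => if PySem.Str.isIn m u then true else prodLoop u rest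

def data_is_prod (datakey : String) : Bool :=
  prodLoop (PySem.Str.upper datakey) prodMap

-- ===== PORT B =====
-- B's generator `any(...)` over window positions, as structural recursion over the chars
def scanProd : List Char → Bool
  | a :: b :: c :: d :: rest =>
      (((a == 'F' || a == 'W') && (b == 'O' || b == 'G' || b == 'W' || b == 'L')) &&
        (c == 'P' && d == 'R'))
      || scanProd (b :: c :: d :: rest)
  | _ => false

def data_is_prod_alt (datakey : String) : Bool :=
  scanProd (PySem.Str.upper datakey).toList

-- ===== PRECONDITION & SPEC =====
def Spec_data_is_prod (datakey : String) (out : Bool) : Prop := out = data_is_prod_alt datakey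
instance (datakey : String) (out : Bool) : Decidable (Spec_data_is_prod datakey out) := by unfold Spec_data_is_prod; infer_instance

-- ===== CLAIM (what is proved, stated in full; the proofs are below) =====
def Claim_equal_data_is_prod : Prop := ∀ (datakey : String), Dom_data_is_prod datakey → Spec_data_is_prod datakey (data_is_prod datakey)

-- ===== LEMMAS AND PROOFS =====
def prodPats : List (List Char) :=
  [['F','O','P','R'], ['F','G','P','R'], ['F','W','P','R'], ['F','L','P','R'],
   ['W','O','P','R'], ['W','G','P','R'], ['W','W','P','R'], ['W','L','P','R']]

theorem prodLoop_eq_any (u : String) (ms : List String) :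
    prodLoop u ms = ms.any (fun m => PySem.Str.isIn m u) := by
  induction ms with
  | nil => rfl
  | cons m rest ih =>
      unfold prodLoop
      split_ifs with h
      · rw [List.any_cons, h, Bool.true_or]
      · rw [List.any_cons, Bool.eq_false_iff.mpr h, Bool.false_or]; exact ih

theorem no_pat_short (l : List Char) (h : l.length < 4) :
    ¬ ∃ m ∈ prodPats, m <:+: l := by
  rintro ⟨m, hm, hinf⟩
  have hlen := hinf.length_le
  have hm4 : m.length = 4 := by fin_cases hm <;> rfl
  omega

theorem scanProd_iff (l : List Char) :
    scanProd l = true ↔ ∃ m ∈ prodPats, m <:+: l := by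
  induction l with
  | nil =>
      simp only [scanProd, Bool.false_eq_true, false_iff]
      exact no_pat_short [] (by simp)
  | cons a tl ih =>
      rcases tl with _ | ⟨b, _ | ⟨c, _ | ⟨d, rest⟩⟩⟩
      · simp only [scanProd, Bool.false_eq_true, false_iff]
        exact no_pat_short [a] (by simp)
      · simp only [scanProd, Bool.false_eq_true, false_iff]
        exact no_pat_short [a, b] (by simp)
      · simp only [scanProd, Bool.false_eq_true, false_iff]
        exact no_pat_short [a, b, c] (by simp)
      · constructor
        · intro h
          simp only [scanProd, Bool.or_eq_true, Bool.and_eq_true, beq_iff_eq] at h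
          rcases h with ⟨⟨ha, hb⟩, hc, hd⟩ | h
          · subst hc hd
            refine ⟨[a, b, 'P', 'R'], ?_, ⟨[], rest, by simp⟩⟩
            rcases ha with rfl | rfl <;> rcases hb with ((rfl | rfl) | rfl) | rfl <;>
              simp [prodPats]
          · obtain ⟨m, hm, hinf⟩ := ih.mp h
            exact ⟨m, hm, hinf.trans (List.suffix_cons a _).isInfix⟩
        · rintro ⟨m, hm, hinf⟩
          show (_ || scanProd (b :: c :: d :: rest)) = true
          rcases (List.infix_cons_iff).mp hinf with hpre | hinf'
          · apply Bool.or_eq_true _ _ |>.mpr; left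
            fin_cases hm <;>
              · rw [List.cons_prefix_cons] at hpre
                obtain ⟨rfl, hpre⟩ := hpre
                rw [List.cons_prefix_cons] at hpre
                obtain ⟨rfl, hpre⟩ := hpre
                rw [List.cons_prefix_cons] at hpre
                obtain ⟨rfl, hpre⟩ := hpre
                rw [List.cons_prefix_cons] at hpre
                obtain ⟨rfl, _⟩ := hpre
                decide
          · exact Bool.or_eq_true _ _ |>.mpr (Or.inr (ih.mpr ⟨m, hm, hinf'⟩))

theorem any_isIn_iff (u : String) :
    (prodMap.any (fun m => PySem.Str.isIn m u) = true) ↔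
      ∃ m ∈ prodPats, m <:+: u.toList := by
  simp only [prodMap, prodPats, List.any_cons, List.any_nil, Bool.or_eq_true,
    Bool.false_eq_true, or_false, PySem.Str.isIn_eq, PySem.Chars.isIn_iff_infix,
    List.mem_cons, List.not_mem_nil, exists_eq_or_imp, exists_eq_left,
    show ("FOPR" : String).toList = ['F','O','P','R'] from rfl,
    show ("FGPR" : String).toList = ['F','G','P','R'] from rfl,
    show ("FWPR" : String).toList = ['F','W','P','R'] from rfl,
    show ("FLPR" : String).toList = ['F','L','P','R'] from rfl,
    show ("WOPR" : String).toList = ['W','O','P','R'] from rfl,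
    show ("WGPR" : String).toList = ['W','G','P','R'] from rfl,
    show ("WWPR" : String).toList = ['W','W','P','R'] from rfl,
    show ("WLPR" : String).toList = ['W','L','P','R'] from rfl]

-- ===== VERDICT (by name: the statement is the Claim_ definition above) =====
theorem data_is_prod_spec : Claim_equal_data_is_prod := by
  intro datakey _
  unfold Spec_data_is_prod data_is_prod data_is_prod_alt
  rw [prodLoop_eq_any]
  apply Bool.eq_iff_iff.mpr
  rw [any_isIn_iff, scanProd_iff]
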